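-- pv_equiv track=rewrite | github.com/dhlab-epfl/fdh-tutorials | crf/utils/tags_format.py | iob_to_iob2
-- ===== SOURCE A (Python) =====
-- def iob_to_iob2(tags):
--     out = []
--     for i, tag in enumerate(tags):
--         if tag[0] == 'I':
--             if i + 1 < len(tags) and tags[i + 1][0] == 'I':
--                 out.append(tag)
--             else:
--                 out.append('B' + tag[1:])
--         else:
--             out.append(tag)
--     return out
-- ===== SOURCE B (Python) =====
-- def iob_to_iob2(tags):
--     out = []
--     next_char = None
--     for tag in reversed(tags):
--         if tag[0] == 'I':
--             if next_char == 'I':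
--                 out.append(tag)
--             else:
--                 out.append('B' + tag[1:])
--         else:
--             out.append(tag)
--         next_char = tag[0]
--     out.reverse()
--     return out
-- ===== Notes on version B (the rewrite author's own statement) =====
-- stated objective: alternative
-- what changed: Replaces the forward loop with index lookahead (tags[i+1]) by a single reverse pass that carries the previous tag's first character in a state variable, appending results and reversing at the end, so no list indexing is needed.
import Mathlib
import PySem

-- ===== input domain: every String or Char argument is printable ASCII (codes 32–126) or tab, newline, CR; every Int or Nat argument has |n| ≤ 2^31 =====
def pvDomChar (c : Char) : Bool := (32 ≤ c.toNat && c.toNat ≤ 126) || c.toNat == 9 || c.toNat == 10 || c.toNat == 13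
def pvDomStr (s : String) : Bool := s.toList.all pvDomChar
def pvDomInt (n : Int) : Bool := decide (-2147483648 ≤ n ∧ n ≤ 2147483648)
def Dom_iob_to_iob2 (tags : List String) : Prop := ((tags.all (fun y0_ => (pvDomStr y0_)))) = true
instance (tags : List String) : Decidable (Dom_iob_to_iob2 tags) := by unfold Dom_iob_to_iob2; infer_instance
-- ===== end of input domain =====

-- B replaces A's forward loop with index lookahead by a reverse pass carrying the previous first char; alternative decomposition, same cost.


-- ===== PORT A =====
-- A's loop body: at index i, an 'I' tag is kept if tags[i+1] exists and starts with 'I', else promoted to 'B'.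
def stepA (tags : List String) (out : List String) (it : Int × String) : List String :=
  let i := it.1
  let tag := it.2
  if PySem.Str.pyGet? tag 0 == some 'I' then
    if decide (i + 1 < (tags.length : Int)) &&
        (((PySem.List.pyGet? tags (i + 1)).bind fun nxt => PySem.Str.pyGet? nxt 0) == some 'I') then
      out ++ [tag]
    else
      out ++ ["B" ++ PySem.Str.slice tag (some 1) none]
  else
    out ++ [tag]

def iob_to_iob2 (tags : List String) : List String :=
  (PySem.List.enumerate tags 0).foldl (stepA tags) []

-- ===== PORT B =====
-- B's loop body over reversed(tags): state is (out, next_char), next_char = first char of the previously seen tag.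
def stepB (st : List String × Option Char) (tag : String) : List String × Option Char :=
  let c := PySem.Str.pyGet? tag 0
  (if c == some 'I' then
     if st.2 == some 'I' then st.1 ++ [tag]
     else st.1 ++ ["B" ++ PySem.Str.slice tag (some 1) none]
   else st.1 ++ [tag], c)

def iob_to_iob2_alt (tags : List String) : List String :=
  ((tags.reverse.foldl stepB ([], none)).1).reverse

-- ===== PRECONDITION & SPEC =====
-- Pre_ excludes exactly the inputs where Python A raises IndexError: a tag that is the empty string (tag[0]).
def Pre_iob_to_iob2 (tags : List String) : Prop := ∀ t ∈ tags, t ≠ ""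
instance (tags : List String) : Decidable (Pre_iob_to_iob2 tags) := by unfold Pre_iob_to_iob2; infer_instance
def pvWitness_iob_to_iob2 : List String := ["I-LOC", "I-LOC", "O", "I-PER"]

def Spec_iob_to_iob2 (tags : List String) (out : List String) : Prop := out = iob_to_iob2_alt tags
instance (tags : List String) (out : List String) : Decidable (Spec_iob_to_iob2 tags out) := by unfold Spec_iob_to_iob2; infer_instance

-- ===== CLAIM (what is proved, stated in full; the proofs are below) =====
def Claim_equal_iob_to_iob2 : Prop := ∀ (tags : List String), Dom_iob_to_iob2 tags → Pre_iob_to_iob2 tags → Spec_iob_to_iob2 tags (iob_to_iob2 tags)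

-- ===== LEMMAS AND PROOFS =====

-- the per-tag decision, as a function of this tag and the next tag's first character
def decide1 (tag : String) (nc : Option Char) : String :=
  if PySem.Str.pyGet? tag 0 == some 'I' then
    if nc == some 'I' then tag else "B" ++ PySem.Str.slice tag (some 1) none
  else tag

-- structural reference: each tag decided against its successor's first character
def specList : List String → List String
  | [] => []
  | t :: rest => decide1 t (rest.head?.bind fun u => PySem.Str.pyGet? u 0) :: specList rest

lemma cond_eq (tags rest' : List String) (s : Nat) (h : tags.drop s = t :: rest') :
    (decide ((s : Int) + 1 < (tags.length : Int)) &&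
      (((PySem.List.pyGet? tags ((s : Int) + 1)).bind fun nxt => PySem.Str.pyGet? nxt 0) == some 'I'))
    = ((rest'.head?.bind fun u => PySem.Str.pyGet? u 0) == some 'I') := by
  have hlen : s < tags.length := by
    by_contra hge
    simp [List.drop_eq_nil_of_le (Nat.le_of_not_lt hge)] at h
  have hrest' : rest' = tags.drop (s + 1) := by
    have := congrArg List.tail h
    simpa [List.tail_drop] using this.symm
  have hidx : ((s : Int) + 1) = ((s + 1 : Nat) : Int) := by push_cast; ring
  rw [hidx, PySem.List.pyGet?_natCast]
  rw [hrest', List.head?_drop]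
  by_cases hlt : s + 1 < tags.length
  · have hlt' : ((s : Int) + 1 < (tags.length : Int)) := by exact_mod_cast hlt
    have hsome : tags[s + 1]? = some tags[s + 1] := List.getElem?_eq_getElem hlt
    simp [hsome, hlt']
  · have hlt' : ¬ ((s : Int) + 1 < (tags.length : Int)) := by exact_mod_cast hlt
    have hnone : tags[s + 1]? = none := List.getElem?_eq_none (Nat.le_of_not_lt hlt)
    simp [hnone, hlt']

lemma foldA_eq (tags : List String) :
    ∀ (rest : List String) (s : Nat) (acc : List String), tags.drop s = rest →
      (PySem.List.enumerate rest (s : Int)).foldl (stepA tags) acc = acc ++ specList rest := by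
  intro rest
  induction rest with
  | nil => intro s acc _; simp [PySem.List.enumerate_nil, specList]
  | cons t rest' ih =>
    intro s acc h
    rw [PySem.List.enumerate_cons, List.foldl_cons]
    have hstep : stepA tags acc ((s : Int), t)
        = acc ++ [decide1 t (rest'.head?.bind fun u => PySem.Str.pyGet? u 0)] := by
      unfold stepA decide1
      dsimp only
      rw [cond_eq tags rest' s h]
      split_ifs <;> simp
    have hdrop' : tags.drop (s + 1) = rest' := by
      have := congrArg List.tail h
      simpa [List.tail_drop] using this
    have hcast : (s : Int) + 1 = ((s + 1 : Nat) : Int) := by push_cast; ring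
    rw [hstep, hcast, ih (s + 1) _ hdrop']
    simp [specList]

lemma A_eq_spec (tags : List String) : iob_to_iob2 tags = specList tags := by
  unfold iob_to_iob2
  have := foldA_eq tags tags 0 [] (by simp)
  simpa using this

lemma foldB_eq (tags : List String) :
    tags.foldr (fun tag st => stepB st tag) ([], none)
      = ((specList tags).reverse, tags.head?.bind fun u => PySem.Str.pyGet? u 0) := by
  induction tags with
  | nil => simp [specList]
  | cons t rest ih =>
    rw [List.foldr_cons, ih]
    simp only [stepB, specList, decide1, List.head?_cons, List.reverse_cons, Option.bind_some]
    split_ifs <;> simp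

lemma B_eq_spec (tags : List String) : iob_to_iob2_alt tags = specList tags := by
  unfold iob_to_iob2_alt
  rw [List.foldl_reverse, foldB_eq]
  simp

-- ===== VERDICT (by name: the statement is the Claim_ definition above) =====
theorem iob_to_iob2_spec : Claim_equal_iob_to_iob2 := by
  intro tags _ _
  unfold Spec_iob_to_iob2
  rw [A_eq_spec, B_eq_spec]
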